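-- pv_equiv track=rewrite | github.com/Lauracf/trap-space-control | control_strategies.py | results_info
-- ===== SOURCE A (Python) =====
-- from typing import List
--
-- def results_info(list_cs: List[dict]):
--     """
--     Returns a string stating the amount and size of the elements in *list_cs*.
--     **returns**:
--         * *text* (string): text stating the number and size of the elements in *CS*.
--     **example**::
--         >>> results_info([{'v1': 1}, {'v2':0, 'v3':1}])
--     "2 control strategies, 1 of size 1, 1 of size 2"
--     """
--
--     text = str(len(list_cs)) + " control strategies"
--     sizes = [len(x) for x in list_cs]
--     cs_sizes = list({(el, sizes.count(el)) for el in sizes})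
--     cs_sizes.sort()
--     for x in cs_sizes:
--         text = text + ", " + str(x[1]) + " of size " + str(x[0])
--         text = f"{len(list_cs)} control strategies, " + ", ".join(f"{x[1]} of size {x[0]}" for x in cs_sizes)
--     return text
-- ===== SOURCE B (Python) =====
-- def results_info(list_cs):
--     # sort the sizes once, then run-length encode them in a single linear pass
--     groups = []  # ascending (size, run-count) pairs
--     for s in sorted(len(x) for x in list_cs):
--         if groups and groups[-1][0] == s:
--             _, c = groups.pop()
--             groups.append((s, c + 1))
--         else:
--             groups.append((s, 1))
--     parts = [str(len(list_cs)) + " control strategies"] + [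
--         str(c) + " of size " + str(s) for s, c in groups]
--     return ", ".join(parts)
-- ===== Notes on version B (the rewrite author's own statement) =====
-- stated objective: alternative
-- what changed: A rescans the whole size list with sizes.count for every element and sorts a set of (size,count) pairs; B sorts the sizes once and run-length encodes them in a single linear pass, then joins the parts (different algorithm, similar measured cost).
import Mathlib
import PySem

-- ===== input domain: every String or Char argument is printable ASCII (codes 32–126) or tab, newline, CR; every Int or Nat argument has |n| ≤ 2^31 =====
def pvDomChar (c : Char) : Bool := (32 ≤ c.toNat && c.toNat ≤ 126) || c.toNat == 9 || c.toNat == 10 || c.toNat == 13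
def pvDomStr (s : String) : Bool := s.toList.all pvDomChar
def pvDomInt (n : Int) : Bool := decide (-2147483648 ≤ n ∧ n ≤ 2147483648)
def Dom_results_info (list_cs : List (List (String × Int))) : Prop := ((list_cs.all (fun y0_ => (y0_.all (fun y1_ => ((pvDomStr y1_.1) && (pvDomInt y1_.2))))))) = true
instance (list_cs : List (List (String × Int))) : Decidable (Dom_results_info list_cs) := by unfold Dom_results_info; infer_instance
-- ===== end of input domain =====

-- B replaces A's per-element `sizes.count` rescans and pair-set by one sort of the sizes
-- followed by a single run-length-encoding pass (objective: alternative; not measurably faster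
-- on the timed inputs).

-- Python's len() of a dict that arrives here as an association list: number of DISTINCT keys
-- (exact: duplicate keys collapse when Python builds the dict). Shared by both ports.
def pyDictLen (x : List (String × Int)) : Int :=
  ((PySem.Set.ofList (x.map Prod.fst)).length : Int)

-- ===== PORT A =====
def results_info (list_cs : List (List (String × Int))) : String :=
  let text := PySem.Int.toStr (list_cs.length : Int) ++ " control strategies"
  let sizes : List Int := list_cs.map (fun x => pyDictLen x)
  let cs_sizes : List (Int × Int) :=
    PySem.List.sorted2
      (PySem.Set.ofList (sizes.map (fun el => (el, (PySem.List.count sizes el : Int)))))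
      Prod.fst Prod.snd
  cs_sizes.foldl
    (fun text _x =>
      let _text1 := text ++ ", " ++ PySem.Int.toStr _x.2 ++ " of size " ++ PySem.Int.toStr _x.1
      let text := PySem.Int.toStr (list_cs.length : Int) ++ " control strategies, " ++
        PySem.Str.join ", "
          (cs_sizes.map (fun x => PySem.Int.toStr x.2 ++ " of size " ++ PySem.Int.toStr x.1))
      text)
    text

-- ===== PORT B =====
-- the body of Source B's for-loop: extend the last run or start a new one
def rleStep (groups : List (Int × Int)) (s : Int) : List (Int × Int) :=
  match groups.getLast? with
  | some (s0, c) => if s0 = s then groups.dropLast ++ [(s, c + 1)] else groups ++ [(s, 1)]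
  | none => groups ++ [(s, 1)]

def results_info_alt (list_cs : List (List (String × Int))) : String :=
  let groups : List (Int × Int) :=
    (PySem.List.sorted (list_cs.map (fun x => pyDictLen x)) (fun s => s) false).foldl rleStep []
  let parts :=
    (PySem.Int.toStr (list_cs.length : Int) ++ " control strategies") ::
      groups.map (fun g => PySem.Int.toStr g.2 ++ " of size " ++ PySem.Int.toStr g.1)
  PySem.Str.join ", " parts

-- ===== PRECONDITION & SPEC =====
def Spec_results_info (list_cs : List (List (String × Int))) (out : String) : Prop := out = results_info_alt list_cs
instance (list_cs : List (List (String × Int))) (out : String) : Decidable (Spec_results_info list_cs out) := by unfold Spec_results_info; infer_instance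

-- ===== CLAIM (what is proved, stated in full; the proofs are below) =====
def Claim_equal_results_info : Prop := ∀ (list_cs : List (List (String × Int))), Dom_results_info list_cs → Spec_results_info list_cs (results_info list_cs)

-- ===== LEMMAS AND PROOFS =====

-- A's loop rebinds `text` to a value that ignores the accumulator; such a fold is its last overwrite
theorem foldl_overwrite {α β : Type} (K : β) (l : List α) (init : β) (h : l ≠ []) :
    l.foldl (fun _ _ => K) init = K := by
  induction l generalizing init with
  | nil => exact absurd rfl h
  | cons x xs ih =>
    by_cases hx : xs = []
    · subst hx; rfl
    · exact ih K hx

-- insertBy with comparators agreeing on the inserted element vs the accumulator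
theorem insertBy_congr {α : Type} (b₁ b₂ : α → α → Bool) (x : α) (acc : List α)
    (h : ∀ a ∈ acc, b₁ x a = b₂ x a) :
    PySem.List.insertBy b₁ x acc = PySem.List.insertBy b₂ x acc := by
  induction acc with
  | nil => rfl
  | cons y ys ih =>
    simp only [PySem.List.insertBy, h y (by simp)]
    split
    · rfl
    · simp only [List.cons.injEq, true_and]
      exact ih (fun a ha => h a (by simp [ha]))

-- an insertion-sort fold only compares elements drawn from acc/xs
theorem foldl_insertBy_congr {α : Type} (b₁ b₂ : α → α → Bool) (xs acc : List α)
    (h : ∀ a ∈ xs, ∀ c, (c ∈ acc ∨ c ∈ xs) → b₁ a c = b₂ a c) :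
    xs.foldl (fun acc x => PySem.List.insertBy b₁ x acc) acc
      = xs.foldl (fun acc x => PySem.List.insertBy b₂ x acc) acc := by
  induction xs generalizing acc with
  | nil => rfl
  | cons x xs ih =>
    simp only [List.foldl_cons]
    rw [insertBy_congr b₁ b₂ x acc (fun a ha => h x (by simp) a (Or.inl ha))]
    apply ih (PySem.List.insertBy b₂ x acc)
    intro a ha c hc
    apply h a (by simp [ha])
    rcases hc with hc' | hc'
    · rcases (PySem.List.mem_insertBy b₂ x c acc).mp hc' with e | e
      · exact Or.inr (by simp [e])
      · exact Or.inl e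
    · exact Or.inr (by simp [hc'])

-- when the first components determine the elements, Python's lexicographic pair sort
-- is the sort by first component
theorem sorted2_eq_sorted_fst (xs : List (Int × Int))
    (hdet : ∀ a ∈ xs, ∀ b ∈ xs, a.1 = b.1 → a = b) :
    PySem.List.sorted2 xs Prod.fst Prod.snd = PySem.List.sorted xs (fun p => p.1) false := by
  rw [PySem.List.sorted_eq_foldl_insertBy]
  show xs.foldl (fun acc x => PySem.List.insertBy
      (fun a b => decide (a.1 < b.1) || (!decide (b.1 < a.1) && decide (a.2 < b.2))) x acc) []
    = xs.foldl (fun acc x => PySem.List.insertBy (fun a b => decide (a.1 < b.1)) x acc) []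
  apply foldl_insertBy_congr
  intro a ha c hc
  have hc' : c ∈ xs := hc.elim (fun h => absurd h (List.not_mem_nil)) id
  rcases lt_trichotomy a.1 c.1 with h | h | h
  · simp [h, not_lt.mpr (le_of_lt h)]
  · have : a = c := hdet a ha c hc' h
    subst this
    simp
  · simp [h, not_lt.mpr (le_of_lt h)]

-- run-length encoding of a weakly increasing list: strictly increasing first components,
-- and exactly the pairs (value, multiplicity)
theorem rle_inv (u : List Int) (hu : u.Pairwise (· ≤ ·)) :
    (u.foldl rleStep []).Pairwise (fun a b : Int × Int => a.1 < b.1) ∧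
    ∀ p : Int × Int, p ∈ u.foldl rleStep [] ↔ p.1 ∈ u ∧ p.2 = (u.count p.1 : Int) := by
  induction u using List.reverseRecOn with
  | nil => simp
  | append_singleton u s ih =>
    have hpa := List.pairwise_append.mp hu
    have hu' : u.Pairwise (· ≤ ·) := hpa.1
    have hle : ∀ x ∈ u, x ≤ s := fun x hx => hpa.2.2 x hx s (by simp)
    obtain ⟨hpw, hmem⟩ := ih hu'
    rw [List.foldl_append]
    simp only [List.foldl_cons, List.foldl_nil]
    set G := u.foldl rleStep [] with hG
    rcases hL : G.getLast? with _ | ⟨s0, c⟩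
    · -- G = [], hence u = []
      have hGnil : G = [] := List.getLast?_eq_none_iff.mp hL
      have hunil : u = [] := by
        by_contra hne
        obtain ⟨x, hx⟩ := List.exists_mem_of_ne_nil u hne
        have : (x, (u.count x : Int)) ∈ G := (hmem _).mpr ⟨hx, rfl⟩
        simp [hGnil] at this
      subst hunil
      have hstep : rleStep G s = [(s, 1)] := by rw [hGnil]; rfl
      rw [hstep]
      constructor
      · simp
      · intro p
        constructor
        · intro hp
          have hp' : p = (s, 1) := by simpa using hp
          subst hp'; simp
        · rintro ⟨h1, h2⟩
          have h1' : p.1 = s := by simpa using h1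
          have h2' : p.2 = 1 := by rw [h2, h1']; simp
          simp [Prod.ext_iff, h1', h2']
    · -- G ends with (s0, c)
      have hGne : G ≠ [] := by
        intro h; rw [h] at hL; simp at hL
      have hlast : G.getLast hGne = (s0, c) := by
        have h2 := List.getLast?_eq_some_getLast hGne
        rw [hL] at h2
        exact (Option.some_inj.mp h2).symm
      have hGd : G.dropLast ++ [(s0, c)] = G := by
        rw [← hlast]; exact List.dropLast_concat_getLast hGne
      have hs0G : (s0, c) ∈ G := List.mem_of_getLast? hL
      obtain ⟨hs0u', hc''⟩ := (hmem _).mp hs0G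
      have hs0u : s0 ∈ u := hs0u'
      have hc : c = (u.count s0 : Int) := hc''
      have hpwd := List.pairwise_append.mp (hGd ▸ hpw)
      have hDlt : ∀ p ∈ G.dropLast, p.1 < s0 := fun p hp => hpwd.2.2 p hp (s0, c) (by simp)
      have hmax : ∀ p ∈ G, p.1 ≤ s0 := by
        intro p hp
        rw [← hGd] at hp
        rcases List.mem_append.mp hp with h | h
        · exact le_of_lt (hDlt p h)
        · simp at h; subst h; rfl
      simp only [rleStep, hL]
      by_cases hss : s0 = s
      · subst hss
        rw [if_pos rfl]
        constructor
        · refine List.pairwise_append.mpr ⟨hpwd.1, by simp, ?_⟩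
          intro p hp q hq
          simp at hq; subst hq
          exact hDlt p hp
        · intro p
          rw [List.mem_append]
          constructor
          · rintro (hp | hp)
            · have hpG : p ∈ G := by rw [← hGd]; exact List.mem_append_left _ hp
              obtain ⟨h1, h2⟩ := (hmem _).mp hpG
              have hne : p.1 ≠ s0 := ne_of_lt (hDlt p hp)
              refine ⟨by simp [h1], ?_⟩
              rw [List.count_append, List.count_singleton]
              simp [Ne.symm hne, h2]
            · simp at hp; subst hp
              refine ⟨by simp, ?_⟩
              rw [List.count_append, List.count_singleton, hc]
              push_cast
              simp
          · rintro ⟨h1, h2⟩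
            by_cases hp1 : p.1 = s0
            · right
              have hp2 : p.2 = c + 1 := by
                rw [h2, hp1, List.count_append, List.count_singleton, hc]
                push_cast
                simp
              simp [Prod.ext_iff, hp1, hp2]
            · left
              have hpu : p.1 ∈ u := by
                rcases List.mem_append.mp h1 with h | h
                · exact h
                · simp at h; exact absurd h hp1
              have hp2 : p.2 = (u.count p.1 : Int) := by
                rw [h2, List.count_append, List.count_singleton]
                simp [Ne.symm hp1]
              have hpG : p ∈ G := (hmem _).mpr ⟨hpu, hp2⟩
              rw [← hGd] at hpG
              rcases List.mem_append.mp hpG with h | h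
              · exact h
              · simp at h
                exact absurd (congrArg Prod.fst h) hp1
      · rw [if_neg hss]
        have hs0s : s0 ≤ s := hle s0 hs0u
        have hsu : s ∉ u := by
          intro hs
          have : (s, (u.count s : Int)) ∈ G := (hmem _).mpr ⟨hs, rfl⟩
          have := hmax _ this
          exact hss (le_antisymm hs0s this)
        constructor
        · refine List.pairwise_append.mpr ⟨hpw, by simp, ?_⟩
          intro p hp q hq
          simp at hq; subst hq
          obtain ⟨hpu, _⟩ := (hmem _).mp hp
          exact lt_of_le_of_ne (hle _ hpu) (fun e => hsu (by rwa [e] at hpu))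
        · intro p
          rw [List.mem_append]
          have hcnt0 : u.count s = 0 := List.count_eq_zero.mpr hsu
          constructor
          · rintro (hp | hp)
            · obtain ⟨h1, h2⟩ := (hmem _).mp hp
              have hne : p.1 ≠ s := fun e => hsu (by rwa [e] at h1)
              refine ⟨by simp [h1], ?_⟩
              rw [List.count_append, List.count_singleton]
              simp [Ne.symm hne, h2]
            · simp at hp; subst hp
              refine ⟨by simp, ?_⟩
              rw [List.count_append, List.count_singleton, hcnt0]
              simp
          · rintro ⟨h1, h2⟩
            by_cases hp1 : p.1 = s
            · right
              have hp2 : p.2 = 1 := by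
                rw [h2, hp1, List.count_append, List.count_singleton, hcnt0]
                simp
              simp [Prod.ext_iff, hp1, hp2]
            · left
              have hpu : p.1 ∈ u := by
                rcases List.mem_append.mp h1 with h | h
                · exact h
                · simp at h; exact absurd h hp1
              have hp2 : p.2 = (u.count p.1 : Int) := by
                rw [h2, List.count_append, List.count_singleton]
                simp [Ne.symm hp1]
              exact (hmem _).mpr ⟨hpu, hp2⟩

-- membership in A's set of (size, count) pairs
theorem mem_pairSet (sizes : List Int) (p : Int × Int) :
    p ∈ PySem.Set.ofList (sizes.map (fun el => (el, (PySem.List.count sizes el : Int)))) ↔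
      p.1 ∈ sizes ∧ p.2 = (sizes.count p.1 : Int) := by
  rw [PySem.Set.mem_ofList, List.mem_map]
  constructor
  · rintro ⟨el, hel, rfl⟩
    exact ⟨hel, by simp [PySem.List.count_eq]⟩
  · rintro ⟨h1, h2⟩
    refine ⟨p.1, h1, ?_⟩
    rw [PySem.List.count_eq]
    exact Prod.ext_iff.mpr ⟨rfl, h2.symm⟩

-- the sorted pair set of A IS the run-length encoding of the sorted sizes of B
theorem cs_eq_groups (sizes : List Int) :
    PySem.List.sorted2
        (PySem.Set.ofList (sizes.map (fun el => (el, (PySem.List.count sizes el : Int)))))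
        Prod.fst Prod.snd
      = (PySem.List.sorted sizes (fun s => s) false).foldl rleStep [] := by
  set S := PySem.Set.ofList (sizes.map (fun el => (el, (PySem.List.count sizes el : Int)))) with hS
  have hdet : ∀ a ∈ S, ∀ b ∈ S, a.1 = b.1 → a = b := by
    intro a ha b hb he
    obtain ⟨_, ha2⟩ := (mem_pairSet sizes a).mp ha
    obtain ⟨_, hb2⟩ := (mem_pairSet sizes b).mp hb
    exact Prod.ext_iff.mpr ⟨he, by rw [ha2, hb2, he]⟩
  rw [sorted2_eq_sorted_fst S hdet]
  have hperm := PySem.List.sorted_perm sizes (fun s => s) false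
  obtain ⟨hpw, hmem⟩ := rle_inv (PySem.List.sorted sizes (fun s => s) false)
    (PySem.List.sorted_pairwise sizes (fun s => s))
  set G := (PySem.List.sorted sizes (fun s => s) false).foldl rleStep [] with hGdef
  have hmemG : ∀ p, p ∈ G ↔ p ∈ S := by
    intro p
    rw [hmem p, mem_pairSet]
    rw [PySem.List.mem_sorted, hperm.count_eq]
  have hndG : G.Nodup := List.Pairwise.imp (fun h => fun e => absurd (congrArg Prod.fst e) (ne_of_lt h)) hpw
  have hndS : S.Nodup := PySem.Set.nodup_ofList _
  have hSG : S.Perm G := (List.perm_ext_iff_of_nodup hndS hndG).mpr (fun a => (hmemG a).symm)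
  refine List.Perm.eq_of_pairwise (le := fun a b : Int × Int => a.1 ≤ b.1) ?_ ?_ ?_ ?_
  · intro a b ha hb h1 h2
    have haS : a ∈ S := (PySem.List.mem_sorted _ _ _ _).mp ha
    have hbS : b ∈ S := (hmemG b).mp hb
    exact hdet a haS b hbS (le_antisymm h1 h2)
  · exact PySem.List.sorted_pairwise S (fun p => p.1)
  · exact hpw.imp le_of_lt
  · exact (PySem.List.sorted_perm S (fun p => p.1) false).trans hSG

-- splitting off the header of B's comma-join (on the char-list side)
theorem join_header (h : String) (L : List String) :
    (PySem.Str.join ", " (h :: L)).toList =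
      if L = [] then h.toList
      else h.toList ++ (", " : String).toList ++ (PySem.Str.join ", " L).toList := by
  rcases L with _ | ⟨q, rest⟩
  · simp [PySem.Str.toList_join, PySem.Chars.join_singleton]
  · simp only [PySem.Str.toList_join, List.map_cons, PySem.Chars.join_cons_cons,
      reduceCtorEq, if_false]

-- ===== VERDICT (by name: the statement is the Claim_ definition above) =====
theorem results_info_spec : Claim_equal_results_info := by
  intro list_cs _
  unfold Spec_results_info
  simp only [results_info, results_info_alt]
  rw [cs_eq_groups]
  set sizes := list_cs.map (fun x => pyDictLen x) with hsizes
  set G := (PySem.List.sorted sizes (fun s => s) false).foldl rleStep [] with hGdef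
  apply String.toList_inj.mp
  rcases hg : G with _ | ⟨q, rest⟩
  · simp
  · rw [foldl_overwrite _ _ _ (by simp)]
    rw [join_header]
    simp only [List.map_cons, reduceCtorEq, if_false]
    simp [String.toList_append, List.append_assoc]
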